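-- pv_equiv track=rewrite | github.com/patelkevin686/2d_list | 2dlistAssign1.py | find
-- ===== SOURCE A (Python) =====
-- def find(a, b):
--     list1 = []
--     list2 = [-1, -1]
-- #loop start
--     for i in range(len(a)):
--         for j in range(len(a[i])):
--             if (a[i][j] == b):
--                 list1.append(i)
--                 list1.append(j)
-- #condition to check
--     if len(list1) == 2:
--         return list1
--     else:
--         return list2
-- ===== SOURCE B (Python) =====
-- def find(a, b):
--     count = 0
--     for row in a:
--         for x in row:
--             if x == b:
--                 count += 1
--     if count != 1:
--         return [-1, -1]
--     for i in range(len(a)):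
--         for j in range(len(a[i])):
--             if a[i][j] == b:
--                 return [i, j]
-- ===== Notes on version B (the rewrite author's own statement) =====
-- stated objective: simpler
-- what changed: B replaces A's accumulation of all matching coordinates into one flat list (checked for length 2 at the end) by a count-then-locate pair of passes: a single integer counter over the grid, then an early-returning second scan that yields [i, j] only when the count is exactly 1.
import Mathlib
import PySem

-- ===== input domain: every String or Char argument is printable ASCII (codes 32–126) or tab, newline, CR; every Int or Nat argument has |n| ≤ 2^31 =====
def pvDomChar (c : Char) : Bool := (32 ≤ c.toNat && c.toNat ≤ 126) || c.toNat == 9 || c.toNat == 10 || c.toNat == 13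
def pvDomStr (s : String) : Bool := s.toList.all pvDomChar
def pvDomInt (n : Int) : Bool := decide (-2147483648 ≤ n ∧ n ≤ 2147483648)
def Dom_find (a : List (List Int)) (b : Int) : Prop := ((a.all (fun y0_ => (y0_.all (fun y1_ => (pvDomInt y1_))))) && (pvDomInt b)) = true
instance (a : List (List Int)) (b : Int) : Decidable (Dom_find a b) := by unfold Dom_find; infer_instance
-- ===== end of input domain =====

-- B replaces A's flat accumulation of all matching coordinates (length-2 check at the end)
-- by a count-then-locate pair of passes; objective: simpler (same cost).

-- ===== PORT A =====
-- inner loop 'for j in range(len(a[i])): if a[i][j] == b: list1 += [i, j]', as structural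
-- recursion over the row carrying the index j and the accumulator list1
def findRowA (row : List Int) (b : Int) (i j : Int) (acc : List Int) : List Int :=
  match row with
  | [] => acc
  | x :: xs => findRowA xs b i (j + 1) (if x == b then acc ++ [i, j] else acc)

-- outer loop 'for i in range(len(a))', same state
def findRowsA (rows : List (List Int)) (b : Int) (i : Int) (acc : List Int) : List Int :=
  match rows with
  | [] => acc
  | r :: rs => findRowsA rs b (i + 1) (findRowA r b i 0 acc)

def find (a : List (List Int)) (b : Int) : List Int :=
  let list1 := findRowsA a b 0 []
  let list2 : List Int := [-1, -1]
  if list1.length = 2 then list1 else list2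

-- ===== PORT B =====
-- first pass: the integer counter over both loops
def countB (a : List (List Int)) (b : Int) : Int :=
  a.foldl (fun c row => row.foldl (fun c x => if x == b then c + 1 else c) c) 0

-- second pass, with Python's early 'return [i, j]' rendered as Option
def locRowB (row : List Int) (b : Int) (i j : Int) : Option (List Int) :=
  match row with
  | [] => none
  | x :: xs => if x == b then some [i, j] else locRowB xs b i (j + 1)

def locRowsB (rows : List (List Int)) (b : Int) (i : Int) : Option (List Int) :=
  match rows with
  | [] => none
  | r :: rs =>
    match locRowB r b i 0 with
    | some v => some v
    | none => locRowsB rs b (i + 1)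

def find_alt (a : List (List Int)) (b : Int) : List Int :=
  if countB a b ≠ 1 then [-1, -1]
  else (locRowsB a b 0).getD [-1, -1]  -- count = 1 guarantees the scan finds the cell; getD is unreachable

-- ===== PRECONDITION & SPEC =====
def Spec_find (a : List (List Int)) (b : Int) (out : List Int) : Prop := out = find_alt a b
instance (a : List (List Int)) (b : Int) (out : List Int) : Decidable (Spec_find a b out) := by unfold Spec_find; infer_instance

-- ===== CLAIM (what is proved, stated in full; the proofs are below) =====
def Claim_equal_find : Prop := ∀ (a : List (List Int)) (b : Int), Dom_find a b → Spec_find a b (find a b)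

-- ===== LEMMAS AND PROOFS =====

-- reference: the list of matching coordinates as pairs
def occRow (row : List Int) (b : Int) (i j : Int) : List (Int × Int) :=
  match row with
  | [] => []
  | x :: xs => (if x == b then [(i, j)] else []) ++ occRow xs b i (j + 1)

def occ (rows : List (List Int)) (b : Int) (i : Int) : List (Int × Int) :=
  match rows with
  | [] => []
  | r :: rs => occRow r b i 0 ++ occ rs b (i + 1)

def flat2 (l : List (Int × Int)) : List Int := l.flatMap (fun p => [p.1, p.2])

theorem flat2_length (l : List (Int × Int)) : (flat2 l).length = 2 * l.length := by
  induction l with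
  | nil => simp [flat2]
  | cons p t ih => simp [flat2, List.flatMap_cons] at *; omega

theorem findRowA_eq (row : List Int) (b : Int) (i j : Int) (acc : List Int) :
    findRowA row b i j acc = acc ++ flat2 (occRow row b i j) := by
  induction row generalizing j acc with
  | nil => simp [findRowA, occRow, flat2]
  | cons x xs ih =>
    simp only [findRowA, occRow, ih]
    by_cases h : x == b <;> simp [h, flat2]

theorem findRowsA_eq (rows : List (List Int)) (b : Int) (i : Int) (acc : List Int) :
    findRowsA rows b i acc = acc ++ flat2 (occ rows b i) := by
  induction rows generalizing i acc with
  | nil => simp [findRowsA, occ, flat2]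
  | cons r rs ih =>
    simp [findRowsA, occ, ih, findRowA_eq, flat2]

theorem countRow_eq (row : List Int) (b : Int) (i j c : Int) :
    row.foldl (fun c x => if x == b then c + 1 else c) c = c + (occRow row b i j).length := by
  induction row generalizing j c with
  | nil => simp [occRow]
  | cons x xs ih =>
    simp only [List.foldl_cons]
    by_cases h : x == b
    · rw [if_pos h, ih (j + 1) (c + 1)]
      simp [occRow, h]; omega
    · rw [if_neg h, ih (j + 1) c]
      simp [occRow, h]

theorem countB_eq (rows : List (List Int)) (b : Int) (i c : Int) :
    rows.foldl (fun c row => row.foldl (fun c x => if x == b then c + 1 else c) c) c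
      = c + (occ rows b i).length := by
  induction rows generalizing i c with
  | nil => simp [occ]
  | cons r rs ih =>
    simp only [List.foldl_cons, occ]
    rw [countRow_eq r b i 0 c, ih (i + 1)]
    simp; omega

theorem locRowB_eq (row : List Int) (b : Int) (i j : Int) :
    locRowB row b i j = (occRow row b i j).head?.map (fun p => [p.1, p.2]) := by
  induction row generalizing j with
  | nil => simp [locRowB, occRow]
  | cons x xs ih =>
    simp only [locRowB, occRow]
    by_cases h : x == b <;> simp [h, ih]

theorem locRowsB_eq (rows : List (List Int)) (b : Int) (i : Int) :
    locRowsB rows b i = (occ rows b i).head?.map (fun p => [p.1, p.2]) := by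
  induction rows generalizing i with
  | nil => simp [locRowsB, occ]
  | cons r rs ih =>
    simp only [locRowsB, occ, locRowB_eq, ih]
    cases h : (occRow r b i 0) with
    | nil => simp
    | cons p t => simp

-- ===== VERDICT (by name: the statement is the Claim_ definition above) =====
theorem find_spec : Claim_equal_find := by
  intro a b _
  unfold Spec_find find find_alt countB
  rw [findRowsA_eq, countB_eq a b 0 0, locRowsB_eq]
  simp only [List.nil_append, Int.zero_add]
  rcases h : occ a b 0 with _ | ⟨p, t⟩
  · simp [flat2]
  · rcases t with _ | ⟨q, t'⟩
    · simp [flat2]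
    · have hl : (flat2 (p :: q :: t')).length = 2 * (p :: q :: t').length := flat2_length _
      simp only [List.length_cons] at hl
      have : (flat2 (p :: q :: t')).length ≠ 2 := by omega
      simp only [this, if_false]
      rw [if_pos (by simp only [List.length_cons]; push_cast; omega :
        ¬ (((p :: q :: t').length : Int) = 1))]
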